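-- pv_equiv track=rewrite | github.com/tyler-harpool/verdictum | fix_remaining_test_issues.py | fix_event_types
-- ===== SOURCE A (Python) =====
-- def fix_event_types(content):
--     """Fix court event types to snake_case."""
--     replacements = {
--         '"Hearing"': '"motion_hearing"',
--         '"Trial"': '"jury_trial"',
--         '"Arraignment"': '"arraignment"',
--         '"Sentencing"': '"sentencing"',
--         '"StatusConference"': '"status_conference"',
--         '"PretrialConference"': '"pretrial_conference"',
--         '"InitialAppearance"': '"initial_appearance"',
--         '"BailHearing"': '"bail_hearing"',
--         '"PleaHearing"': '"plea_hearing"',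
--         '"MotionHearing"': '"motion_hearing"',
--     }
--
--     for old, new in replacements.items():
--         content = content.replace(old, new)
--
--     return content
-- ===== SOURCE B (Python) =====
-- def _snake(t):
--     if t == 'Hearing': return 'motion_hearing'
--     if t == 'Trial': return 'jury_trial'
--     if t == 'Arraignment': return 'arraignment'
--     if t == 'Sentencing': return 'sentencing'
--     if t == 'StatusConference': return 'status_conference'
--     if t == 'PretrialConference': return 'pretrial_conference'
--     if t == 'InitialAppearance': return 'initial_appearance'
--     if t == 'BailHearing': return 'bail_hearing'
--     if t == 'PleaHearing': return 'plea_hearing'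
--     if t == 'MotionHearing': return 'motion_hearing'
--     return t
--
--
-- def fix_event_types(content):
--     """Fix court event types to snake_case."""
--     first, *rest = content.split('"')
--     if not rest:
--         return content
--     *inner, last = rest
--     return '"'.join([first] + [_snake(p) for p in inner] + [last])
-- ===== Notes on version B (the rewrite author's own statement) =====
-- stated objective: idiomatic
-- what changed: B splits the content once on the double-quote character and maps each inner quote-delimited token through a snake_case renaming function before rejoining, instead of A's ten sequential full-string .replace passes.
import Mathlib
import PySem

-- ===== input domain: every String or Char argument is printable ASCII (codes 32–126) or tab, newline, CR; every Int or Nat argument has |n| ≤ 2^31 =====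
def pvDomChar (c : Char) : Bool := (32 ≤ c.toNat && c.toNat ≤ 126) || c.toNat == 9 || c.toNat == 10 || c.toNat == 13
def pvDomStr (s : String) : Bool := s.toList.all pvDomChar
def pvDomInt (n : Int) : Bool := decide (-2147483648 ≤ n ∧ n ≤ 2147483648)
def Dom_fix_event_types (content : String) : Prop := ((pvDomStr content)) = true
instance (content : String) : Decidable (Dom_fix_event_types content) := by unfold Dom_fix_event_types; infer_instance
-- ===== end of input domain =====

-- B replaces A's ten sequential full-string `.replace` passes by ONE split on the double-quote
-- character, an if-chain snake_case renaming of each inner quote-delimited token, and a rejoin.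

-- ===== PORT A =====
def fix_event_types (content : String) : String :=
  let replacements : PySem.Dict String String := PySem.Dict.mk
    [("\"Hearing\"", "\"motion_hearing\""),
     ("\"Trial\"", "\"jury_trial\""),
     ("\"Arraignment\"", "\"arraignment\""),
     ("\"Sentencing\"", "\"sentencing\""),
     ("\"StatusConference\"", "\"status_conference\""),
     ("\"PretrialConference\"", "\"pretrial_conference\""),
     ("\"InitialAppearance\"", "\"initial_appearance\""),
     ("\"BailHearing\"", "\"bail_hearing\""),
     ("\"PleaHearing\"", "\"plea_hearing\""),
     ("\"MotionHearing\"", "\"motion_hearing\"")]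
  replacements.items.foldl (fun c pr => PySem.Str.replace c pr.1 pr.2) content

-- ===== PORT B =====
-- helper `_snake` of Source B: an if-chain renaming one event-type token
def pvSnake (t : String) : String :=
  if t = "Hearing" then "motion_hearing"
  else if t = "Trial" then "jury_trial"
  else if t = "Arraignment" then "arraignment"
  else if t = "Sentencing" then "sentencing"
  else if t = "StatusConference" then "status_conference"
  else if t = "PretrialConference" then "pretrial_conference"
  else if t = "InitialAppearance" then "initial_appearance"
  else if t = "BailHearing" then "bail_hearing"
  else if t = "PleaHearing" then "plea_hearing"
  else if t = "MotionHearing" then "motion_hearing"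
  else t

def fix_event_types_alt (content : String) : String :=
  match PySem.Str.split? content "\"" with
  | none => content        -- unreachable: the separator "\"" is nonempty
  | some [] => content     -- unreachable: split always returns at least one part
  | some (first :: rest) =>
    if rest = [] then content   -- 'if not rest: return content'
    else
      -- '*inner, last = rest; return '"'.join([first] + [_snake(p) for p in inner] + [last])'
      PySem.Str.join "\"" ([first] ++ rest.dropLast.map pvSnake ++ [rest.getLastD ""])

-- ===== PRECONDITION & SPEC =====
-- the ten event-type names (interiors of the quoted keys of A's dict)
def pvMidsC : List (List Char) :=
  ["Hearing".toList, "Trial".toList, "Arraignment".toList, "Sentencing".toList,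
   "StatusConference".toList, "PretrialConference".toList, "InitialAppearance".toList,
   "BailHearing".toList, "PleaHearing".toList, "MotionHearing".toList]

-- Pre_ excludes content in which two ADJACENT quote-delimited tokens are the same event-type name
-- (overlapping occurrences of one key sharing a quote, e.g. '"Hearing"Hearing"'): there A's greedy
-- in-pass scan consumes the shared quote and leaves the second token unreplaced, an accidental
-- corner on which either behaviour is defensible.
def Pre_fix_event_types (content : String) : Prop :=
  List.IsChain (fun a b => ¬ (a = b ∧ a ∈ pvMidsC))
    (((PySem.Chars.splitOn content.toList ['"']).drop 1).dropLast)

instance (content : String) : Decidable (Pre_fix_event_types content) := by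
  unfold Pre_fix_event_types; infer_instance

def pvWitness_fix_event_types : String := "{\"event_type\": \"Hearing\", \"next\": \"Trial\"}"

def Spec_fix_event_types (content : String) (out : String) : Prop := out = fix_event_types_alt content
instance (content : String) (out : String) : Decidable (Spec_fix_event_types content out) := by
  unfold Spec_fix_event_types; infer_instance

-- ===== CLAIM (what is proved, stated in full; the proofs are below) =====
def Claim_equal_fix_event_types : Prop := ∀ (content : String), Dom_fix_event_types content → Pre_fix_event_types content → Spec_fix_event_types content (fix_event_types content)

-- ===== LEMMAS AND PROOFS =====

-- model of content.split('"') on the character-list level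
def pvSplit : List Char → List (List Char)
  | [] => [[]]
  | c :: t => if c = '"' then [] :: pvSplit t else (pvSplit t).modifyHead (c :: ·)

-- the tail parts of a split, rendered back with their LEADING quotes
def pvJoinT (ps : List (List Char)) : List Char := (ps.map (fun p => '"' :: p)).flatten

-- one key replacement on a single segment
def pvSub (m v x : List Char) : List Char := if x = m then v else x

-- apply f to every part except the last one
def pvInnerMap (f : List Char → List Char) : List (List Char) → List (List Char)
  | [] => []
  | [q] => [q]
  | q :: r :: rs => f q :: pvInnerMap f (r :: rs)

-- trace of one greedy pass of content.replace('"'+m+'"', '"'+v+'"') over the tail parts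
def pvModelT (m v : List Char) : List (List Char) → List Char
  | [] => []
  | [q] => '"' :: q
  | q :: r :: rs =>
    if q = m then (('"' :: v) ++ ['"']) ++ r ++ pvModelT m v rs
    else ('"' :: q) ++ pvModelT m v (r :: rs)

-- the ten (name, snake_case value) pairs on the character level
def pvPairsC : List (List Char × List Char) :=
  [("Hearing".toList, "motion_hearing".toList),
   ("Trial".toList, "jury_trial".toList),
   ("Arraignment".toList, "arraignment".toList),
   ("Sentencing".toList, "sentencing".toList),
   ("StatusConference".toList, "status_conference".toList),
   ("PretrialConference".toList, "pretrial_conference".toList),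
   ("InitialAppearance".toList, "initial_appearance".toList),
   ("BailHearing".toList, "bail_hearing".toList),
   ("PleaHearing".toList, "plea_hearing".toList),
   ("MotionHearing".toList, "motion_hearing".toList)]

theorem pvSplit_ne_nil (cs : List Char) : pvSplit cs ≠ [] := by
  induction cs with
  | nil => simp [pvSplit]
  | cons c t ih =>
    simp only [pvSplit]
    split
    · simp
    · cases h : pvSplit t with
      | nil => exact absurd h ih
      | cons a l => simp [List.modifyHead]

theorem pvJoinT_cons (q : List Char) (qs : List (List Char)) :
    pvJoinT (q :: qs) = ('"' :: q) ++ pvJoinT qs := by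
  simp [pvJoinT]

theorem pvSplitOn_go_eq (fuel : Nat) (cs cur : List Char) (acc : List (List Char))
    (h : cs.length ≤ fuel) :
    PySem.Chars.splitOn.go ['"'] fuel cs cur acc
      = acc.reverse ++ (pvSplit cs).modifyHead (cur.reverse ++ ·) := by
  induction cs generalizing fuel cur acc with
  | nil =>
    cases fuel with
    | zero => simp [PySem.Chars.splitOn.go, pvSplit, List.modifyHead]
    | succ f => simp [PySem.Chars.splitOn.go, pvSplit, List.modifyHead]
  | cons c t ih =>
    cases fuel with
    | zero => simp at h
    | succ f =>
      by_cases hc : c = '"'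
      · subst hc
        rw [show PySem.Chars.splitOn.go ['"'] (f+1) ('"' :: t) cur acc
              = PySem.Chars.splitOn.go ['"'] f t [] (cur.reverse :: acc) by
            simp [PySem.Chars.splitOn.go, List.isPrefixOf]]
        rw [ih f [] (cur.reverse :: acc) (by simpa using Nat.le_of_succ_le_succ h)]
        cases hs : pvSplit t with
        | nil => exact absurd hs (pvSplit_ne_nil t)
        | cons a l => simp [pvSplit, hs, List.modifyHead]
      · rw [show PySem.Chars.splitOn.go ['"'] (f+1) (c :: t) cur acc
              = PySem.Chars.splitOn.go ['"'] f t (c :: cur) acc by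
            simp [PySem.Chars.splitOn.go, List.isPrefixOf, Ne.symm hc]]
        rw [ih f (c :: cur) acc (by simpa using Nat.le_of_succ_le_succ h)]
        cases hs : pvSplit t with
        | nil => exact absurd hs (pvSplit_ne_nil t)
        | cons a l => simp [pvSplit, hc, hs, List.modifyHead]

theorem pvSplitOn_eq (cs : List Char) :
    PySem.Chars.splitOn cs ['"'] = pvSplit cs := by
  have h := pvSplitOn_go_eq (cs.length + 1) cs [] [] (by omega)
  simp only [List.reverse_nil, List.nil_append] at h
  rw [PySem.Chars.splitOn, h]
  cases hs : pvSplit cs with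
  | nil => exact absurd hs (pvSplit_ne_nil cs)
  | cons a l => simp [List.modifyHead]

theorem pvSplit_join (cs : List Char) (p : List Char) (ps : List (List Char))
    (h : pvSplit cs = p :: ps) : p ++ pvJoinT ps = cs := by
  induction cs generalizing p ps with
  | nil =>
    simp [pvSplit] at h
    simp [h.1, h.2, pvJoinT]
  | cons c t ih =>
    by_cases hc : c = '"'
    · subst hc
      simp only [pvSplit] at h
      cases hs : pvSplit t with
      | nil => exact absurd hs (pvSplit_ne_nil t)
      | cons a l =>
        rw [hs] at h
        obtain ⟨rfl, rfl⟩ := by simpa using h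
        have := ih a l hs
        simp [pvJoinT_cons, this]
    · simp only [pvSplit, if_neg hc] at h
      cases hs : pvSplit t with
      | nil => exact absurd hs (pvSplit_ne_nil t)
      | cons a l =>
        rw [hs] at h
        simp [List.modifyHead] at h
        obtain ⟨rfl, rfl⟩ := h
        have := ih a l hs
        simpa using congrArg (c :: ·) this

theorem pvSplit_qf (cs : List Char) : ∀ p ∈ pvSplit cs, '"' ∉ p := by
  induction cs with
  | nil => simp [pvSplit]
  | cons c t ih =>
    by_cases hc : c = '"'
    · subst hc
      simp only [pvSplit]
      intro p hp
      rcases List.mem_cons.mp hp with rfl | hp'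
      · simp
      · exact ih p hp'
    · simp only [pvSplit, if_neg hc]
      cases hs : pvSplit t with
      | nil => exact absurd hs (pvSplit_ne_nil t)
      | cons a l =>
        intro p hp
        simp only [List.modifyHead, List.mem_cons] at hp
        rcases hp with rfl | hp
        · intro hmem
          rcases List.mem_cons.mp hmem with h | h
          · exact hc h.symm
          · exact ih a (by simp [hs]) h
        · exact ih p (by simp [hs, hp])

-- prefix tests against quote-free segments
theorem pvPfx_qf (a : List Char) : ∀ b t, '"' ∉ a → '"' ∉ b →
    ((a ++ ['"']) <+: (b ++ '"' :: t) ↔ a = b) := by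
  induction a with
  | nil =>
    intro b t _ hb
    cases b with
    | nil => simp [List.cons_prefix_cons]
    | cons d b' =>
      simp only [List.nil_append, List.cons_append, List.cons_prefix_cons]
      constructor
      · rintro ⟨h, -⟩
        exact absurd h.symm (by simp at hb; tauto)
      · intro h; exact absurd h.symm (List.cons_ne_nil _ _)
  | cons c a' ih =>
    intro b t ha hb
    cases b with
    | nil =>
      simp only [List.cons_append, List.nil_append, List.cons_prefix_cons]
      constructor
      · rintro ⟨h, -⟩
        exact absurd h (by simp at ha; tauto)
      · intro h; exact absurd h (List.cons_ne_nil _ _)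
    | cons d b' =>
      simp only [List.cons_append, List.cons_prefix_cons]
      rw [ih b' t (by simp at ha; tauto) (by simp at hb; tauto)]
      constructor
      · rintro ⟨rfl, rfl⟩; rfl
      · rintro h; cases h; exact ⟨rfl, rfl⟩

theorem pvPfx_last (a q : List Char) (hq : '"' ∉ q) :
    ¬ ((a ++ ['"']) <+: q) := by
  intro hp
  exact hq (hp.sublist.mem (by simp))

-- replace.go walks unchanged through a quote-free prefix
theorem pvGo_prefix (m v : List Char) (p : List Char) :
    ∀ (fuel : Nat) (u acc : List Char), '"' ∉ p → p.length + u.length ≤ fuel →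
    PySem.Chars.replace.go (('"' :: m) ++ ['"']) (('"' :: v) ++ ['"']) fuel (p ++ u) acc
      = PySem.Chars.replace.go (('"' :: m) ++ ['"']) (('"' :: v) ++ ['"']) (fuel - p.length) u (p.reverse ++ acc) := by
  induction p with
  | nil => intro fuel u acc _ _; simp
  | cons c p' ih =>
    intro fuel u acc hp hlen
    cases fuel with
    | zero => simp at hlen
    | succ f =>
      have hc : ¬ (c = '"') := by simp at hp; tauto
      rw [show PySem.Chars.replace.go (('"' :: m) ++ ['"']) (('"' :: v) ++ ['"']) (f+1) ((c :: p') ++ u) acc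
            = PySem.Chars.replace.go (('"' :: m) ++ ['"']) (('"' :: v) ++ ['"']) f (p' ++ u) (c :: acc) by
          simp [PySem.Chars.replace.go, List.isPrefixOf, Ne.symm hc]]
      rw [ih f u (c :: acc) (by simp at hp; tauto) (by simp at hlen ⊢; omega)]
      simp

-- one greedy replace pass over the rendered tail parts equals the trace model
theorem pvGo_tail (m v : List Char) (hm : '"' ∉ m) :
    ∀ (ps : List (List Char)) (fuel : Nat) (acc : List Char),
    (pvJoinT ps).length ≤ fuel → (∀ p ∈ ps, '"' ∉ p) →
    PySem.Chars.replace.go (('"' :: m) ++ ['"']) (('"' :: v) ++ ['"']) fuel (pvJoinT ps) acc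
      = acc.reverse ++ pvModelT m v ps := by
  intro ps
  induction ps using pvModelT.induct (m := m) with
  | case1 =>
    intro fuel acc _ _
    cases fuel <;> simp [pvJoinT, PySem.Chars.replace.go, pvModelT]
  | case2 q =>
    intro fuel acc hfuel hqf
    have hq : '"' ∉ q := hqf q (by simp)
    simp only [pvJoinT, List.map_cons, List.map_nil, List.flatten_cons, List.flatten_nil,
      List.append_nil, List.length_cons] at hfuel ⊢
    cases fuel with
    | zero => simp at hfuel
    | succ f =>
      rw [show PySem.Chars.replace.go (('"' :: m) ++ ['"']) (('"' :: v) ++ ['"']) (f+1) ('"' :: q) acc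
            = PySem.Chars.replace.go (('"' :: m) ++ ['"']) (('"' :: v) ++ ['"']) f q ('"' :: acc) by
          simp only [PySem.Chars.replace.go, List.cons_append, List.isPrefixOf, beq_self_eq_true,
            Bool.true_and]
          rw [if_neg]
          intro hpf
          exact pvPfx_last m q hq (List.isPrefixOf_iff_prefix.mp (by simpa using hpf))]
      have hgp := pvGo_prefix m v q f [] ('"' :: acc) hq (by simp; omega)
      simp only [List.append_nil] at hgp
      rw [hgp]
      cases hf : f - q.length <;> simp [PySem.Chars.replace.go, pvModelT]
  | case3 r rs ih =>
    intro fuel acc hfuel hqf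
    have hlen : (pvJoinT (m :: r :: rs)).length
        = m.length + 1 + (r.length + 1) + (pvJoinT rs).length := by
      simp [pvJoinT_cons]; omega
    cases fuel with
    | zero => rw [hlen] at hfuel; omega
    | succ f =>
      have hshape : pvJoinT (m :: r :: rs) = '"' :: (m ++ '"' :: (r ++ pvJoinT rs)) := by
        simp [pvJoinT_cons]
      rw [hshape]
      rw [show PySem.Chars.replace.go (('"' :: m) ++ ['"']) (('"' :: v) ++ ['"']) (f+1)
              ('"' :: (m ++ '"' :: (r ++ pvJoinT rs))) acc
            = PySem.Chars.replace.go (('"' :: m) ++ ['"']) (('"' :: v) ++ ['"']) f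
              (List.drop (('"' :: m) ++ ['"']).length ('"' :: (m ++ '"' :: (r ++ pvJoinT rs))))
              ((('"' :: v) ++ ['"']).reverse ++ acc) by
          simp [PySem.Chars.replace.go]]
      have hdrop : List.drop (('"' :: m) ++ ['"']).length ('"' :: (m ++ '"' :: (r ++ pvJoinT rs)))
          = r ++ pvJoinT rs := by
        have : ('"' :: (m ++ '"' :: (r ++ pvJoinT rs))) = (('"' :: m) ++ ['"']) ++ (r ++ pvJoinT rs) := by
          simp
        rw [this, List.drop_left]
      rw [hdrop]
      have hr : '"' ∉ r := hqf r (by simp)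
      have hfm : r.length + (pvJoinT rs).length ≤ f := by rw [hlen] at hfuel; omega
      rw [pvGo_prefix m v r f (pvJoinT rs) _ hr hfm]
      rw [ih (f - r.length) _ (by omega) (fun x hx => hqf x (by simp [hx]))]
      rw [pvModelT]
      simp [List.reverse_append]
  | case4 q r rs hq ih =>
    intro fuel acc hfuel hqf
    have hqQ : '"' ∉ q := hqf q (by simp)
    have hlen : (pvJoinT (q :: r :: rs)).length
        = q.length + 1 + (pvJoinT (r :: rs)).length := by
      simp [pvJoinT_cons]; omega
    cases fuel with
    | zero => rw [hlen] at hfuel; omega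
    | succ f =>
      have hshape : pvJoinT (q :: r :: rs) = '"' :: (q ++ pvJoinT (r :: rs)) := by
        simp [pvJoinT_cons]
      rw [hshape]
      have hshape2 : pvJoinT (r :: rs) = '"' :: (r ++ pvJoinT rs) := by simp [pvJoinT_cons]
      have hnpre : ¬ (((('"' :: m) ++ ['"']).isPrefixOf ('"' :: (q ++ pvJoinT (r :: rs)))) = true) := by
        intro hpf
        have hp : (('"' :: m) ++ ['"']) <+: ('"' :: (q ++ pvJoinT (r :: rs))) :=
          List.isPrefixOf_iff_prefix.mp hpf
        have : (m ++ ['"']) <+: (q ++ '"' :: (r ++ pvJoinT rs)) := by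
          rw [hshape2] at hp
          simpa [List.cons_prefix_cons] using hp
        exact hq (((pvPfx_qf m q (r ++ pvJoinT rs) hm hqQ).mp this).symm)
      rw [show PySem.Chars.replace.go (('"' :: m) ++ ['"']) (('"' :: v) ++ ['"']) (f+1)
              ('"' :: (q ++ pvJoinT (r :: rs))) acc
            = PySem.Chars.replace.go (('"' :: m) ++ ['"']) (('"' :: v) ++ ['"']) f
              (q ++ pvJoinT (r :: rs)) ('"' :: acc) by
          simp only [PySem.Chars.replace.go, List.cons_append, List.isPrefixOf, beq_self_eq_true,
            Bool.true_and]
          rw [if_neg]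
          intro hpf
          exact hnpre (by simpa using hpf)]
      have hfm : q.length + (pvJoinT (r :: rs)).length ≤ f := by rw [hlen] at hfuel; omega
      rw [pvGo_prefix m v q f (pvJoinT (r :: rs)) _ hqQ hfm]
      rw [ih (f - q.length) _ (by omega) (fun x hx => hqf x (by simp at hx ⊢; tauto))]
      rw [pvModelT]
      simp [if_neg hq, List.reverse_append]

theorem pvReplace_eq (m v p : List Char) (ps : List (List Char))
    (hm : '"' ∉ m) (hp : '"' ∉ p) (hps : ∀ x ∈ ps, '"' ∉ x) :
    PySem.Chars.replace (p ++ pvJoinT ps) (('"' :: m) ++ ['"']) (('"' :: v) ++ ['"'])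
      = p ++ pvModelT m v ps := by
  rw [PySem.Chars.replace]
  rw [if_neg (by simp)]
  rw [pvGo_prefix m v p (p ++ pvJoinT ps).length (pvJoinT ps) [] hp (by simp)]
  rw [pvGo_tail m v hm ps _ _ (by simp) hps]
  simp

theorem pvModelT_eq_innerMap (m v : List Char) (hmem : m ∈ pvMidsC) :
    ∀ ps : List (List Char),
    List.IsChain (fun a b => ¬ (a = b ∧ a ∈ pvMidsC)) ps.dropLast →
    pvModelT m v ps = pvJoinT (pvInnerMap (pvSub m v) ps) := by
  intro ps
  induction ps using pvModelT.induct (m := m) with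
  | case1 => intro _; simp [pvModelT, pvInnerMap, pvJoinT]
  | case2 q => intro _; simp [pvModelT, pvInnerMap, pvJoinT]
  | case3 r rs ih =>
    intro hch
    cases rs with
    | nil =>
      simp [pvModelT, pvInnerMap, pvSub, pvJoinT]
    | cons s ss =>
      have hdl : (m :: r :: s :: ss).dropLast = m :: r :: (s :: ss).dropLast := rfl
      rw [hdl] at hch
      rcases List.isChain_cons_cons.mp hch with ⟨hab, hch'⟩
      have hr : r ≠ m := by
        intro h; exact hab ⟨h.symm, hmem⟩
      have hch'' : List.IsChain (fun a b => ¬ (a = b ∧ a ∈ pvMidsC)) (s :: ss).dropLast :=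
        hch'.tail
      rw [pvModelT]
      rw [if_pos rfl]
      rw [ih hch'']
      simp [pvInnerMap, pvSub, hr, pvJoinT_cons]
  | case4 q r rs hq ih =>
    intro hch
    have hch' : List.IsChain (fun a b => ¬ (a = b ∧ a ∈ pvMidsC)) (r :: rs).dropLast := by
      have hdl : (q :: r :: rs).dropLast = q :: (r :: rs).dropLast := rfl
      rw [hdl] at hch
      exact hch.tail
    rw [pvModelT]
    rw [if_neg hq]
    rw [ih hch']
    simp [pvInnerMap, pvSub, hq, pvJoinT_cons]

theorem pvInnerMap_id : ∀ ps : List (List Char), pvInnerMap (fun x => x) ps = ps := by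
  intro ps
  induction ps using pvInnerMap.induct with
  | case1 => simp [pvInnerMap]
  | case2 q => simp [pvInnerMap]
  | case3 q r rs ih => simp [pvInnerMap, ih]

theorem pvInnerMap_comp (f g : List Char → List Char) :
    ∀ ps : List (List Char), pvInnerMap f (pvInnerMap g ps) = pvInnerMap (fun x => f (g x)) ps := by
  intro ps
  induction ps using pvInnerMap.induct with
  | case1 => simp [pvInnerMap]
  | case2 q => simp [pvInnerMap]
  | case3 q r rs ih =>
    cases rs with
    | nil => simp [pvInnerMap]
    | cons s ss => simp only [pvInnerMap] at ih ⊢; rw [ih]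

theorem pvInnerMap_eq (f : List Char → List Char) :
    ∀ ps : List (List Char), ps ≠ [] →
    pvInnerMap f ps = ps.dropLast.map f ++ [ps.getLastD []] := by
  intro ps
  induction ps using pvInnerMap.induct with
  | case1 => intro h; exact absurd rfl h
  | case2 q => intro _; simp [pvInnerMap]
  | case3 q r rs ih =>
    intro _
    rw [show pvInnerMap f (q :: r :: rs) = f q :: pvInnerMap f (r :: rs) from rfl, ih (by simp)]
    rw [show (q :: r :: rs).dropLast = q :: (r :: rs).dropLast from rfl]
    rw [show (q :: r :: rs).getLastD [] = (r :: rs).getLastD [] from rfl]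
    simp

theorem pvInnerMap_qf (g : List Char → List Char) (hg : ∀ x, '"' ∉ x → '"' ∉ g x) :
    ∀ ps : List (List Char), (∀ x ∈ ps, '"' ∉ x) → ∀ x ∈ pvInnerMap g ps, '"' ∉ x := by
  intro ps
  induction ps using pvInnerMap.induct with
  | case1 => simp [pvInnerMap]
  | case2 q => simp [pvInnerMap]
  | case3 q r rs ih =>
    intro hall x hx
    simp only [pvInnerMap, List.mem_cons] at hx
    rcases hx with rfl | hx
    · exact hg q (hall q (by simp))
    · exact ih (fun y hy => hall y (by simp [hy])) x hx

-- A's ten sequential passes over a segment decomposition act as ten segment-wise substitutions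
theorem pvFold (ks : List (List Char × List Char)) :
    ∀ (g : List Char → List Char) (p : List Char) (ps : List (List Char)),
    '"' ∉ p → (∀ x ∈ ps, '"' ∉ x) →
    (∀ x, '"' ∉ x → '"' ∉ g x) →
    (∀ x y, y ∈ pvMidsC → g x = y → x = y) →
    (∀ mv ∈ ks, '"' ∉ mv.1 ∧ '"' ∉ mv.2 ∧ mv.1 ∈ pvMidsC ∧ mv.2 ∉ pvMidsC) →
    List.IsChain (fun a b => ¬ (a = b ∧ a ∈ pvMidsC)) ps.dropLast →
    ks.foldl (fun c mv => PySem.Chars.replace c (('"' :: mv.1) ++ ['"']) (('"' :: mv.2) ++ ['"']))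
        (p ++ pvJoinT (pvInnerMap g ps))
      = p ++ pvJoinT (pvInnerMap (fun x => ks.foldl (fun y mv => pvSub mv.1 mv.2 y) (g x)) ps) := by
  induction ks with
  | nil => intro g p ps _ _ _ _ _ _; simp
  | cons mv ks' ih =>
    intro g p ps hp hps hgqf hgref hks hch
    obtain ⟨hm1, hm2, hm3, hm4⟩ := hks mv (by simp)
    rw [List.foldl_cons]
    rw [pvReplace_eq mv.1 mv.2 p (pvInnerMap g ps) hm1 hp (pvInnerMap_qf g hgqf ps hps)]
    have hchain2 : List.IsChain (fun a b => ¬ (a = b ∧ a ∈ pvMidsC)) (pvInnerMap g ps).dropLast := by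
      cases hempty : ps with
      | nil => simp [pvInnerMap]
      | cons z zs =>
        rw [← hempty]
        rw [pvInnerMap_eq g ps (by simp [hempty])]
        rw [List.dropLast_concat]
        rw [List.isChain_map]
        refine hch.imp ?_
        intro a b hab hcon
        obtain ⟨hgab, hgmem⟩ := hcon
        have ha : a = g a := hgref a (g a) hgmem rfl
        have hb : b = g b := hgref b (g b) (hgab ▸ hgmem) rfl
        refine hab ⟨by rw [ha, hgab, ← hb], by rw [ha]; exact hgmem⟩
    rw [pvModelT_eq_innerMap mv.1 mv.2 hm3 (pvInnerMap g ps) hchain2]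
    rw [pvInnerMap_comp]
    rw [ih (fun x => pvSub mv.1 mv.2 (g x)) p ps hp hps
        (by
          intro x hx
          by_cases h : g x = mv.1
          · simp [pvSub, h, hm2]
          · simp [pvSub, h]; exact hgqf x hx)
        (by
          intro x y hy h
          by_cases hgx : g x = mv.1
          · simp only [pvSub, if_pos hgx] at h
            exact absurd (h ▸ hy) hm4
          · simp only [pvSub, if_neg hgx] at h
            exact hgref x y hy h)
        (fun m hm => hks m (by simp [hm])) hch]
    rfl

-- the String-level fold of A equals the character-level fold
theorem pvBridgeA (ks : List (String × String)) :
    ∀ s : String,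
    (ks.foldl (fun c pr => PySem.Str.replace c pr.1 pr.2) s).toList
      = ks.foldl (fun c pr => PySem.Chars.replace c pr.1.toList pr.2.toList) s.toList := by
  induction ks with
  | nil => intro s; rfl
  | cons k ks ih =>
    intro s
    rw [List.foldl_cons, List.foldl_cons, ih, PySem.Str.toList_replace]

theorem pvJoin_eq : ∀ (zs : List (List Char)) (x : List Char),
    PySem.Chars.join ['"'] (x :: zs) = x ++ pvJoinT zs := by
  intro zs
  induction zs with
  | nil => intro x; simp [PySem.Chars.join, List.intercalate, pvJoinT]
  | cons z zs ih =>
    intro x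
    have h1 : List.intersperse ['"'] (x :: z :: zs) = x :: ['"'] :: List.intersperse ['"'] (z :: zs) := rfl
    simp only [PySem.Chars.join, List.intercalate] at ih ⊢
    rw [h1]
    simp only [List.flatten_cons]
    rw [show (List.intersperse ['"'] (z :: zs)).flatten = z ++ pvJoinT zs from ih z]
    simp [pvJoinT_cons]

-- B's if-chain renaming equals the composition of A's ten segment-wise substitutions
theorem pvSnake_eq (s : String) :
    (pvSnake s).toList = pvPairsC.foldl (fun y mv => pvSub mv.1 mv.2 y) s.toList := by
  by_cases h1 : s = "Hearing"; · subst h1; decide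
  by_cases h2 : s = "Trial"; · subst h2; decide
  by_cases h3 : s = "Arraignment"; · subst h3; decide
  by_cases h4 : s = "Sentencing"; · subst h4; decide
  by_cases h5 : s = "StatusConference"; · subst h5; decide
  by_cases h6 : s = "PretrialConference"; · subst h6; decide
  by_cases h7 : s = "InitialAppearance"; · subst h7; decide
  by_cases h8 : s = "BailHearing"; · subst h8; decide
  by_cases h9 : s = "PleaHearing"; · subst h9; decide
  by_cases h10 : s = "MotionHearing"; · subst h10; decide
  have t1 : ¬ (s.toList = ['H','e','a','r','i','n','g']) := fun h => h1 (String.ext h)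
  have t2 : ¬ (s.toList = ['T','r','i','a','l']) := fun h => h2 (String.ext h)
  have t3 : ¬ (s.toList = ['A','r','r','a','i','g','n','m','e','n','t']) := fun h => h3 (String.ext h)
  have t4 : ¬ (s.toList = ['S','e','n','t','e','n','c','i','n','g']) := fun h => h4 (String.ext h)
  have t5 : ¬ (s.toList = ['S','t','a','t','u','s','C','o','n','f','e','r','e','n','c','e']) := fun h => h5 (String.ext h)
  have t6 : ¬ (s.toList = ['P','r','e','t','r','i','a','l','C','o','n','f','e','r','e','n','c','e']) := fun h => h6 (String.ext h)
  have t7 : ¬ (s.toList = ['I','n','i','t','i','a','l','A','p','p','e','a','r','a','n','c','e']) := fun h => h7 (String.ext h)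
  have t8 : ¬ (s.toList = ['B','a','i','l','H','e','a','r','i','n','g']) := fun h => h8 (String.ext h)
  have t9 : ¬ (s.toList = ['P','l','e','a','H','e','a','r','i','n','g']) := fun h => h9 (String.ext h)
  have t10 : ¬ (s.toList = ['M','o','t','i','o','n','H','e','a','r','i','n','g']) := fun h => h10 (String.ext h)
  rw [pvSnake]
  simp only [if_neg h1, if_neg h2, if_neg h3, if_neg h4, if_neg h5, if_neg h6, if_neg h7,
    if_neg h8, if_neg h9, if_neg h10]
  simp [pvPairsC, pvSub, t1, t2, t3, t4, t5, t6, t7, t8, t9, t10]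

-- shape of B's joined list, with the renaming function abstracted
theorem pvBsideEq (lk : String → String) (F : List Char → List Char)
    (hlk : ∀ x : List Char, (lk (String.ofList x)).toList = F x)
    (p q : List Char) (qs : List (List Char)) :
    List.map String.toList
        ([String.ofList p] ++ (List.map String.ofList (q :: qs)).dropLast.map lk
          ++ [(List.map String.ofList (q :: qs)).getLastD ""])
      = p :: ((q :: qs).dropLast.map F ++ [(q :: qs).getLastD []]) := by
  simp only [List.map_append, List.map_cons, List.map_nil, String.toList_ofList]
  have h1 : List.map String.toList (List.map lk (String.ofList q :: List.map String.ofList qs).dropLast)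
      = List.map F (q :: qs).dropLast := by
    rw [show (String.ofList q :: List.map String.ofList qs) = List.map String.ofList (q :: qs) from rfl]
    rw [← List.map_dropLast, List.map_map, List.map_map]
    apply List.map_congr_left
    intro a _
    simp only [Function.comp]
    exact hlk a
  have h2 : ((String.ofList q :: List.map String.ofList qs).getLastD "").toList
      = (q :: qs).getLastD [] := by
    rw [show (String.ofList q :: List.map String.ofList qs) = List.map String.ofList (q :: qs) from rfl]
    rw [show ("" : String) = String.ofList [] from rfl, List.getLastD_map, String.toList_ofList]
  rw [h1, h2]
  simp

-- assembled equality of the two ports, on the character level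
set_option maxRecDepth 16384 in
set_option maxHeartbeats 2000000 in
theorem pvMain (content : String) (hpre : Pre_fix_event_types content) :
    fix_event_types content = fix_event_types_alt content := by
  obtain ⟨p, ps, hsplit⟩ : ∃ p ps, pvSplit content.toList = p :: ps := by
    cases hs : pvSplit content.toList with
    | nil => exact absurd hs (pvSplit_ne_nil _)
    | cons a l => exact ⟨a, l, rfl⟩
  have hjoin : p ++ pvJoinT ps = content.toList := pvSplit_join _ p ps hsplit
  have hpqf : '"' ∉ p := pvSplit_qf content.toList p (by rw [hsplit]; simp)
  have hpsqf : ∀ x ∈ ps, '"' ∉ x := fun x hx =>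
    pvSplit_qf content.toList x (by rw [hsplit]; simp [hx])
  have hch : List.IsChain (fun a b => ¬ (a = b ∧ a ∈ pvMidsC)) ps.dropLast := by
    have h := hpre
    rw [Pre_fix_event_types, pvSplitOn_eq, hsplit] at h
    simpa using h
  -- A side
  have hA : (fix_event_types content).toList
      = p ++ pvJoinT (pvInnerMap (fun x => pvPairsC.foldl (fun y mv => pvSub mv.1 mv.2 y) x) ps) := by
    simp only [fix_event_types]
    rw [pvBridgeA]
    rw [show ([("\"Hearing\"", "\"motion_hearing\""), ("\"Trial\"", "\"jury_trial\""),
        ("\"Arraignment\"", "\"arraignment\""), ("\"Sentencing\"", "\"sentencing\""),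
        ("\"StatusConference\"", "\"status_conference\""),
        ("\"PretrialConference\"", "\"pretrial_conference\""),
        ("\"InitialAppearance\"", "\"initial_appearance\""),
        ("\"BailHearing\"", "\"bail_hearing\""), ("\"PleaHearing\"", "\"plea_hearing\""),
        ("\"MotionHearing\"", "\"motion_hearing\"")] : List (String × String))
        = pvPairsC.map (fun mv => (String.ofList (('"' :: mv.1) ++ ['"']), String.ofList (('"' :: mv.2) ++ ['"']))) from by decide]
    rw [List.foldl_map]
    simp only [String.toList_ofList]
    rw [show content.toList = p ++ pvJoinT (pvInnerMap (fun x => x) ps) by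
        rw [pvInnerMap_id]; exact hjoin.symm]
    exact pvFold pvPairsC (fun x => x) p ps hpqf hpsqf (fun x hx => hx)
      (fun x y _ h => h) (by decide) hch
  -- B side
  have hsplitB : PySem.Str.split? content "\"" = some ((p :: ps).map String.ofList) := by
    rw [PySem.Str.split?]
    have h : PySem.Chars.split? content.toList ("\"" : String).toList = some (p :: ps) := by
      rw [show ("\"" : String).toList = ['"'] from rfl, PySem.Chars.split?]
      rw [if_neg (by simp)]
      rw [pvSplitOn_eq, hsplit]
    rw [h]
    rfl
  cases ps with
  | nil =>
    have hBeq : fix_event_types_alt content = content := by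
      simp [fix_event_types_alt, hsplitB]
    have hAeq : (fix_event_types content).toList = content.toList := by
      rw [hA]
      simpa [pvInnerMap, pvJoinT] using hjoin
    rw [hBeq]
    exact String.ext hAeq
  | cons q qs =>
    apply String.ext
    rw [hA]
    simp only [fix_event_types_alt, hsplitB, List.map_cons]
    rw [if_neg (by simp)]
    rw [show (String.ofList q :: List.map String.ofList qs) = List.map String.ofList (q :: qs) from rfl]
    rw [PySem.Str.toList_join]
    rw [show ("\"" : String).toList = ['"'] from rfl]
    rw [pvBsideEq pvSnake
      (fun x => pvPairsC.foldl (fun y mv => pvSub mv.1 mv.2 y) x)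
      (fun x => by rw [pvSnake_eq (String.ofList x), String.toList_ofList]) p q qs]
    rw [pvJoin_eq]
    rw [pvInnerMap_eq (fun x => pvPairsC.foldl (fun y mv => pvSub mv.1 mv.2 y) x) (q :: qs) (by simp)]

-- ===== VERDICT (by name: the statement is the Claim_ definition above) =====
theorem fix_event_types_spec : Claim_equal_fix_event_types := by
  intro content _ hpre
  unfold Spec_fix_event_types
  exact pvMain content hpre
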